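-- pv_equiv track=rewrite | github.com/Dpalme/Advent-Of-Code | 2020/day17.py | cycle3
-- ===== SOURCE A (Python) =====
-- from itertools import product
--
-- def cycle3(cubes, size, cycs):
--     spr, zm = range(size), 1+(cycs*2)
--     cpy = [[[0 for x in spr] for y in spr] for z in range(zm)]
--     for z in range(zm):
--         for x, y in product(range(size), repeat=2):
--             stt = cubes[z][y][x]
--             nei = sum([cubes[z+k][y+j][x+i]
--                        for i, j, k in product((-1, 0, 1), repeat=3) if (
--                 0 <= x+i and x+i < size) and (
--                 0 <= y+j and y+j < size) and (
--                 0 <= z+k and z+k < zm)]) - stt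
--
--             cpy[z][y][x] = stt
--             if stt and not (nei == 2 or nei == 3):
--                 cpy[z][y][x] = 0
--             elif not stt and nei == 3:
--                 cpy[z][y][x] = 1
--     return cpy
-- ===== SOURCE B (Python) =====
-- def _rule(stt, nei):
--     if stt:
--         return stt if nei == 2 or nei == 3 else 0
--     return 1 if nei == 3 else 0
--
--
-- def cycle3(cubes, size, cycs):
--     # Separable box filter: three 1-D window-sum passes (z, then y, then x),
--     # then one rule-application pass, instead of a 27-offset gather per cell.
--     zm = 1 + cycs * 2
--     offs = (-1, 0, 1)
--     sz = [[[sum(cubes[z + k][y][x] for k in offs if 0 <= z + k < zm)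
--             for x in range(size)] for y in range(size)] for z in range(zm)]
--     szy = [[[sum(sz[z][y + j][x] for j in offs if 0 <= y + j < size)
--              for x in range(size)] for y in range(size)] for z in range(zm)]
--     szyx = [[[sum(szy[z][y][x + i] for i in offs if 0 <= x + i < size)
--               for x in range(size)] for y in range(size)] for z in range(zm)]
--     return [[[_rule(cubes[z][y][x], szyx[z][y][x] - cubes[z][y][x])
--               for x in range(size)] for y in range(size)] for z in range(zm)]
-- ===== Notes on version B (the rewrite author's own statement) =====
-- stated objective: faster
-- what changed: Replaces the per-cell gather over the 27-offset product (with three bounds tests per term) by a separable box filter: three 1-D window-sum passes over x, then y, then z, then one rule-application pass.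
import Mathlib
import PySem

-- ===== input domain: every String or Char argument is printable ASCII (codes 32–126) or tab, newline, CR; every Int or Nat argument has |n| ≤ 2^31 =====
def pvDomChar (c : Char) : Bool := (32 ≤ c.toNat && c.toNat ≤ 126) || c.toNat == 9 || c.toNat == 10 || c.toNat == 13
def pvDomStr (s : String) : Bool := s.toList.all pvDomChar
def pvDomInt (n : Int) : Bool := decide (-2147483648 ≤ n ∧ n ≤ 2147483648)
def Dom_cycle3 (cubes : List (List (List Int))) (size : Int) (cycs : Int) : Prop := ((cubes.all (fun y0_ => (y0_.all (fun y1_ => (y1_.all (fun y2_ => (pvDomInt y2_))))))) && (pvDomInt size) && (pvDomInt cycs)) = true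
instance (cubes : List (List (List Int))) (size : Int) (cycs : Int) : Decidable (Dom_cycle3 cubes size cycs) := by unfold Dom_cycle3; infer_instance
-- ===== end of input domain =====

-- B replaces A's 27-offset per-cell gather by a separable box filter (three 1-D
-- window-sum passes, z then y then x, plus a rule pass); measurably faster by a
-- constant factor; return values proved equal on Pre_ (where the Python A returns).


-- ===== PORT A =====
-- cubes[z][y][x]: exact where Python's chained indexing succeeds (guaranteed by
-- Pre_); the 0 default is only reached where the Python raises.
def pvGet3 (g : List (List (List Int))) (z y x : Int) : Int :=
  ((((PySem.List.pyGet? g z).bind (fun L => PySem.List.pyGet? L y)).bind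
      (fun r => PySem.List.pyGet? r x)).getD 0)

-- cpy[z][y][x] = v; indices here are always nonnegative and in range of cpy.
def pvSet3 (g : List (List (List Int))) (z y x : Int) (v : Int) : List (List (List Int)) :=
  g.modify z.toNat (fun L => L.modify y.toNat (fun r => r.set x.toNat v))

-- itertools.product(l, repeat=2) / (l, repeat=3): first component varies slowest
def pvProd2 (l : List Int) : List (Int × Int) :=
  l.flatMap (fun a => l.map (fun b => (a, b)))
def pvProd3 (l : List Int) : List (Int × Int × Int) :=
  l.flatMap (fun a => l.flatMap (fun b => l.map (fun c => (a, b, c))))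

-- the sum comprehension of A (before '- stt')
def pvNeiA (cubes : List (List (List Int))) (size zm z y x : Int) : Int :=
  (((pvProd3 [-1, 0, 1]).filter (fun t =>
      (0 ≤ x + t.1 ∧ x + t.1 < size) ∧ (0 ≤ y + t.2.1 ∧ y + t.2.1 < size) ∧
      (0 ≤ z + t.2.2 ∧ z + t.2.2 < zm))).map
    (fun t => pvGet3 cubes (z + t.2.2) (y + t.2.1) (x + t.1))).sum

-- A's loop body for one cell (x = xy.1, y = xy.2): stt, nei, the two rewrites of cpy[z][y][x]
def pvAVal (cubes : List (List (List Int))) (size zm z y x : Int) : Int :=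
  let stt := pvGet3 cubes z y x
  let nei := pvNeiA cubes size zm z y x - stt
  if stt ≠ 0 ∧ ¬(nei = 2 ∨ nei = 3) then 0
  else if stt = 0 ∧ nei = 3 then 1
  else stt

def pvAStep (cubes : List (List (List Int))) (size zm : Int)
    (cpy : List (List (List Int))) (z : Int) (xy : Int × Int) : List (List (List Int)) :=
  pvSet3 cpy z xy.2 xy.1 (pvAVal cubes size zm z xy.2 xy.1)

-- spr = range(size) is a lazy object in Python; it is expanded at each use site
def cycle3 (cubes : List (List (List Int))) (size : Int) (cycs : Int) : List (List (List Int)) :=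
  let zm := 1 + cycs * 2
  let cpy := (PySem.List.pyRange 0 zm 1).map (fun _ =>
    (PySem.List.pyRange 0 size 1).map (fun _ =>
      (PySem.List.pyRange 0 size 1).map (fun _ => (0 : Int))))
  (PySem.List.pyRange 0 zm 1).foldl (fun cpy z =>
    (pvProd2 (PySem.List.pyRange 0 size 1)).foldl
      (fun cpy xy => pvAStep cubes size zm cpy z xy) cpy) cpy

-- ===== PORT B =====
-- [[[f z y x for x in range(size)] for y in range(size)] for z in range(zm)]
def pvMk (zm size : Int) (f : Int → Int → Int → Int) : List (List (List Int)) :=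
  (PySem.List.pyRange 0 zm 1).map (fun z =>
    (PySem.List.pyRange 0 size 1).map (fun y =>
      (PySem.List.pyRange 0 size 1).map (fun x => f z y x)))

def pvRule (stt nei : Int) : Int :=
  if stt ≠ 0 then (if nei = 2 ∨ nei = 3 then stt else 0)
  else if nei = 3 then 1 else 0

-- pass 1: 1-D window sums along z
def pvPassZ (g : List (List (List Int))) (size zm : Int) : List (List (List Int)) :=
  pvMk zm size (fun z y x =>
    ((([-1, 0, 1] : List Int).filter (fun k => 0 ≤ z + k ∧ z + k < zm)).map
      (fun k => pvGet3 g (z + k) y x)).sum)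

-- pass 2: 1-D window sums along y
def pvPassY (g : List (List (List Int))) (size zm : Int) : List (List (List Int)) :=
  pvMk zm size (fun z y x =>
    ((([-1, 0, 1] : List Int).filter (fun j => 0 ≤ y + j ∧ y + j < size)).map
      (fun j => pvGet3 g z (y + j) x)).sum)

-- pass 3: 1-D window sums along x
def pvPassX (g : List (List (List Int))) (size zm : Int) : List (List (List Int)) :=
  pvMk zm size (fun z y x =>
    ((([-1, 0, 1] : List Int).filter (fun i => 0 ≤ x + i ∧ x + i < size)).map
      (fun i => pvGet3 g z y (x + i))).sum)

def cycle3_alt (cubes : List (List (List Int))) (size : Int) (cycs : Int) : List (List (List Int)) :=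
  let zm := 1 + cycs * 2
  let sz := pvPassZ cubes size zm
  let szy := pvPassY sz size zm
  let szyx := pvPassX szy size zm
  pvMk zm size (fun z y x =>
    pvRule (pvGet3 cubes z y x)
      (pvGet3 szyx z y x - pvGet3 cubes z y x))

-- ===== PRECONDITION & SPEC =====
-- Pre_ holds exactly where the Python A returns: whenever the loops run at all
-- (size > 0 and zm = 1+2*cycs > 0, i.e. 0 ≤ cycs), every indexed cell must exist.
def Pre_cycle3 (cubes : List (List (List Int))) (size : Int) (cycs : Int) : Prop :=
  0 < size → 0 ≤ cycs →
    (1 + cycs * 2 ≤ (cubes.length : Int) ∧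
      ∀ p ∈ PySem.List.enumerate cubes 0, p.1 < 1 + cycs * 2 →
        (size ≤ (p.2.length : Int) ∧
          ∀ q ∈ PySem.List.enumerate p.2 0, q.1 < size → size ≤ (q.2.length : Int)))
instance (cubes : List (List (List Int))) (size : Int) (cycs : Int) : Decidable (Pre_cycle3 cubes size cycs) := by unfold Pre_cycle3; infer_instance

def pvWitness_cycle3 : List (List (List Int)) × Int × Int := ([[[1]]], 1, 0)

def Spec_cycle3 (cubes : List (List (List Int))) (size : Int) (cycs : Int) (out : List (List (List Int))) : Prop := out = cycle3_alt cubes size cycs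
instance (cubes : List (List (List Int))) (size : Int) (cycs : Int) (out : List (List (List Int))) : Decidable (Spec_cycle3 cubes size cycs out) := by unfold Spec_cycle3; infer_instance

-- ===== CLAIM (what is proved, stated in full; the proofs are below) =====
def Claim_equal_cycle3 : Prop := ∀ (cubes : List (List (List Int))) (size : Int) (cycs : Int), Dom_cycle3 cubes size cycs → Pre_cycle3 cubes size cycs → Spec_cycle3 cubes size cycs (cycle3 cubes size cycs)

-- ===== LEMMAS AND PROOFS =====

-- cell accessor / shape over Nat indices, for the proofs
def pvCell (g : List (List (List Int))) (a b c : Nat) : Option Int :=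
  (g[a]?.bind (fun L => L[b]?)).bind (fun r => r[c]?)

def pvShape (g : List (List (List Int))) (zn sn : Nat) : Prop :=
  g.length = zn ∧ ∀ (a : Nat) (L : List (List Int)), g[a]? = some L →
    (L.length = sn ∧ ∀ (b : Nat) (r : List Int), L[b]? = some r → r.length = sn)

theorem pvGet3_cell (g : List (List (List Int))) (a b c : Nat) :
    pvGet3 g (a : Int) (b : Int) (c : Int) = (pvCell g a b c).getD 0 := by
  simp [pvGet3, pvCell, PySem.List.pyGet?_natCast]

theorem pvMk_shape (zm size : Int) (f : Int → Int → Int → Int) :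
    pvShape (pvMk zm size f) zm.toNat size.toNat := by
  refine ⟨?_, ?_⟩
  · rw [pvMk, List.length_map, PySem.List.length_pyRange_one]
    omega
  · intro a L hL
    have hmem : L ∈ pvMk zm size f := List.mem_of_getElem? hL
    rw [pvMk] at hmem
    obtain ⟨z0, hz0, rfl⟩ := List.mem_map.mp hmem
    constructor
    · rw [List.length_map, PySem.List.length_pyRange_one]; omega
    · intro b r hr
      obtain ⟨y0, hy0, rfl⟩ := List.mem_map.mp (List.mem_of_getElem? hr)
      rw [List.length_map, PySem.List.length_pyRange_one]; omega

theorem pvMk_cellN (zm size : Int) (f : Int → Int → Int → Int) (a b c : Nat)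
    (ha : a < zm.toNat) (hb : b < size.toNat) (hc : c < size.toNat) :
    pvCell (pvMk zm size f) a b c = some (f (a : Int) (b : Int) (c : Int)) := by
  simp [pvCell, pvMk, PySem.List.pyRange_one, List.map_map, List.getElem?_map,
    List.getElem?_range, ha, hb, hc]

theorem pvMk_cell (zm size : Int) (f : Int → Int → Int → Int) (z y x : Int)
    (hz : 0 ≤ z ∧ z < zm) (hy : 0 ≤ y ∧ y < size) (hx : 0 ≤ x ∧ x < size) :
    pvGet3 (pvMk zm size f) z y x = f z y x := by
  obtain ⟨hz0, hz1⟩ := hz; obtain ⟨hy0, hy1⟩ := hy; obtain ⟨hx0, hx1⟩ := hx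
  lift z to ℕ using hz0 with a
  lift y to ℕ using hy0 with b
  lift x to ℕ using hx0 with c
  rw [pvGet3_cell, pvMk_cellN zm size f a b c (by omega) (by omega) (by omega)]
  rfl

-- ---------- generic sum rearrangement ----------
theorem sum_filter_map_int {α : Type} (p : α → Prop) [DecidablePred p]
    (f : α → Int) (l : List α) :
    ((l.filter p).map f).sum = (l.map (fun a => if p a then f a else 0)).sum := by
  induction l with
  | nil => simp
  | cons a l ih =>
    by_cases h : p a <;> simp [List.filter_cons, h, ih]

theorem sum_flatMap_map_int {α β : Type} (l : List α) (g : α → List β) (f : β → Int) :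
    ((l.flatMap g).map f).sum = (l.map (fun a => ((g a).map f).sum)).sum := by
  induction l with
  | nil => simp
  | cons a l ih => simp [List.flatMap_cons, ih]

theorem ite_sum_push {α : Type} (p : Prop) [Decidable p] (m : List α) (h : α → Int) :
    (if p then (m.map h).sum else 0) = (m.map (fun j => if p then h j else 0)).sum := by
  by_cases hp : p <;> simp [hp]

-- A's filtered 27-term sum equals B's three nested filtered 1-D sums
theorem pvFact (px py pz : Int → Prop) [DecidablePred px] [DecidablePred py]
    [DecidablePred pz] (f : Int → Int → Int → Int) :
    (((pvProd3 [-1, 0, 1]).filter (fun t => px t.1 ∧ py t.2.1 ∧ pz t.2.2)).map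
        (fun t => f t.1 t.2.1 t.2.2)).sum
    = ((([-1, 0, 1] : List Int).filter px).map (fun i =>
        ((([-1, 0, 1] : List Int).filter py).map (fun j =>
          ((([-1, 0, 1] : List Int).filter pz).map (fun k => f i j k)).sum)).sum)).sum := by
  rw [sum_filter_map_int, sum_filter_map_int]
  simp only [pvProd3, sum_flatMap_map_int, List.map_map, Function.comp_def]
  simp only [ite_and, ite_sum_push, sum_filter_map_int]

-- ---------- B-side cell characterisation ----------
-- the triple nested filtered sum (value of szyx at an in-range cell)
def pvS (cubes : List (List (List Int))) (size zm z y x : Int) : Int :=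
  ((([-1, 0, 1] : List Int).filter (fun i => 0 ≤ x + i ∧ x + i < size)).map (fun i =>
    ((([-1, 0, 1] : List Int).filter (fun j => 0 ≤ y + j ∧ y + j < size)).map (fun j =>
      ((([-1, 0, 1] : List Int).filter (fun k => 0 ≤ z + k ∧ z + k < zm)).map (fun k =>
        pvGet3 cubes (z + k) (y + j) (x + i))).sum)).sum)).sum

theorem pvPasses_cell (cubes : List (List (List Int))) (size zm z y x : Int)
    (hz : 0 ≤ z ∧ z < zm) (hy : 0 ≤ y ∧ y < size) (hx : 0 ≤ x ∧ x < size) :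
    pvGet3 (pvPassX (pvPassY (pvPassZ cubes size zm) size zm) size zm) z y x
      = pvS cubes size zm z y x := by
  rw [pvPassX, pvMk_cell _ _ _ _ _ _ hz hy hx, pvS]
  apply congrArg List.sum
  apply List.map_congr_left
  intro i hi
  have hxi : 0 ≤ x + i ∧ x + i < size := by
    simpa using (List.mem_filter.mp hi).2
  rw [pvPassY, pvMk_cell _ _ _ _ _ _ hz hy hxi]
  apply congrArg List.sum
  apply List.map_congr_left
  intro j hj
  have hyj : 0 ≤ y + j ∧ y + j < size := by
    simpa using (List.mem_filter.mp hj).2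
  rw [pvPassZ, pvMk_cell _ _ _ _ _ _ hz hyj hxi]

-- per-cell agreement of A's written value with B's cell value
theorem pvCellEq (cubes : List (List (List Int))) (size zm z y x : Int)
    (hz : 0 ≤ z ∧ z < zm) (hy : 0 ≤ y ∧ y < size) (hx : 0 ≤ x ∧ x < size) :
    pvAVal cubes size zm z y x
      = pvRule (pvGet3 cubes z y x)
          (pvGet3 (pvPassX (pvPassY (pvPassZ cubes size zm) size zm) size zm) z y x
            - pvGet3 cubes z y x) := by
  rw [pvPasses_cell cubes size zm z y x hz hy hx]
  have hS : pvNeiA cubes size zm z y x = pvS cubes size zm z y x := by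
    rw [pvNeiA, pvS,
      pvFact (fun i => 0 ≤ x + i ∧ x + i < size) (fun j => 0 ≤ y + j ∧ y + j < size)
        (fun k => 0 ≤ z + k ∧ z + k < zm)
        (fun i j k => pvGet3 cubes (z + k) (y + j) (x + i))]
  rw [pvAVal, pvRule, ← hS]
  split_ifs <;> omega

-- ---------- A-side: the double fold as one fold over a triple list ----------
theorem foldl_foldl_flatMap {α β σ : Type} (l : List α) (h : α → List β)
    (step : σ → α → β → σ) (g : σ) :
    l.foldl (fun s z => (h z).foldl (fun s xy => step s z xy) s) g
      = (l.flatMap (fun z => (h z).map (fun xy => (z, xy)))).foldl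
          (fun s t => step s t.1 t.2) g := by
  induction l generalizing g with
  | nil => simp
  | cons a l ih => simp [List.flatMap_cons, List.foldl_append, List.foldl_map, ih]

theorem pvSet3_shape (g : List (List (List Int))) (zn sn : Nat) (z y x v : Int)
    (hg : pvShape g zn sn) : pvShape (pvSet3 g z y x v) zn sn := by
  obtain ⟨hlen, hcell⟩ := hg
  refine ⟨by simpa [pvSet3] using hlen, ?_⟩
  intro a L hL
  rw [pvSet3, List.getElem?_modify] at hL
  by_cases hza : z.toNat = a
  · simp only [hza, if_pos] at hL
    rcases Option.map_eq_some_iff.mp (by simpa using hL) with ⟨L0, hL0, rfl⟩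
    obtain ⟨hL0len, hL0rows⟩ := hcell a L0 hL0
    refine ⟨by simpa using hL0len, ?_⟩
    intro b r hr
    rw [List.getElem?_modify] at hr
    by_cases hyb : y.toNat = b
    · simp only [hyb, if_pos] at hr
      rcases Option.map_eq_some_iff.mp (by simpa using hr) with ⟨r0, hr0, rfl⟩
      simpa using hL0rows b r0 hr0
    · simp only [if_neg hyb] at hr
      exact hL0rows b r (by simpa using hr)
  · simp only [if_neg hza] at hL
    exact hcell a L (by simpa using hL)

theorem pvCell_set3 (g : List (List (List Int))) (zn sn : Nat)
    (hg : pvShape g zn sn) (z y x : Int)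
    (hz : 0 ≤ z ∧ z < (zn : Int)) (hy : 0 ≤ y ∧ y < (sn : Int)) (hx : 0 ≤ x ∧ x < (sn : Int))
    (v : Int) (a b c : Nat) (ha : a < zn) (hb : b < sn) (hc : c < sn) :
    pvCell (pvSet3 g z y x v) a b c
      = if (a : Int) = z ∧ (b : Int) = y ∧ (c : Int) = x then some v
        else pvCell g a b c := by
  obtain ⟨hlen, hcell⟩ := hg
  have hga : a < g.length := by omega
  obtain ⟨L, hL⟩ : ∃ L, g[a]? = some L := ⟨g[a], List.getElem?_eq_getElem hga⟩
  obtain ⟨hLlen, hLrows⟩ := hcell a L hL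
  have hgb : b < L.length := by omega
  obtain ⟨r, hr⟩ : ∃ r, L[b]? = some r := ⟨L[b], List.getElem?_eq_getElem hgb⟩
  have hrlen : r.length = sn := hLrows b r hr
  by_cases hza : z.toNat = a
  · by_cases hyb : y.toNat = b
    · by_cases hxc : x.toNat = c
      · rw [if_pos (by omega)]
        simp [pvCell, pvSet3, List.getElem?_modify, hza, hyb, hxc, hL, hr,
          List.getElem?_set, hrlen, hc]
      · rw [if_neg (by omega)]
        simp [pvCell, pvSet3, List.getElem?_modify, hza, hyb, hxc, hL, hr,
          List.getElem?_set]
    · rw [if_neg (by omega)]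
      simp [pvCell, pvSet3, List.getElem?_modify, hza, hyb, hL, hr]
  · rw [if_neg (by omega)]
    simp [pvCell, pvSet3, List.getElem?_modify, hza, hL, hr]

-- the fold invariant: each listed cell holds its written value, others untouched
theorem pvFoldA (cubes : List (List (List Int))) (size zm : Int)
    (ts : List (Int × Int × Int)) (g : List (List (List Int)))
    (hg : pvShape g zm.toNat size.toNat)
    (hts : ∀ t ∈ ts, 0 ≤ t.1 ∧ t.1 < zm ∧ 0 ≤ t.2.1 ∧ t.2.1 < size ∧
            0 ≤ t.2.2 ∧ t.2.2 < size) :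
    pvShape (ts.foldl (fun s t => pvAStep cubes size zm s t.1 t.2) g) zm.toNat size.toNat ∧
    ∀ (a b c : Nat), a < zm.toNat → b < size.toNat → c < size.toNat →
      pvCell (ts.foldl (fun s t => pvAStep cubes size zm s t.1 t.2) g) a b c
        = if ((a : Int), ((c : Int), (b : Int))) ∈ ts
          then some (pvAVal cubes size zm (a : Int) (b : Int) (c : Int))
          else pvCell g a b c := by
  induction ts generalizing g with
  | nil => exact ⟨hg, fun a b c _ _ _ => by simp⟩
  | cons t ts ih =>
    obtain ⟨htz0, htz1, htx0, htx1, hty0, hty1⟩ := hts t (List.mem_cons_self)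
    have hstep : pvAStep cubes size zm g t.1 t.2
        = pvSet3 g t.1 t.2.2 t.2.1 (pvAVal cubes size zm t.1 t.2.2 t.2.1) := rfl
    have hg' : pvShape (pvAStep cubes size zm g t.1 t.2) zm.toNat size.toNat := by
      rw [hstep]; exact pvSet3_shape _ _ _ _ _ _ _ hg
    obtain ⟨ihShape, ihCell⟩ := ih (pvAStep cubes size zm g t.1 t.2) hg'
      (fun t' ht' => hts t' (List.mem_cons_of_mem _ ht'))
    refine ⟨by simpa using ihShape, ?_⟩
    intro a b c ha hb hc
    rw [List.foldl_cons, ihCell a b c ha hb hc]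
    have hset := pvCell_set3 g zm.toNat size.toNat ⟨hg.1, hg.2⟩ t.1 t.2.2 t.2.1
      (by refine ⟨htz0, ?_⟩; omega) (by refine ⟨hty0, ?_⟩; omega) (by refine ⟨htx0, ?_⟩; omega)
      (pvAVal cubes size zm t.1 t.2.2 t.2.1) a b c ha hb hc
    have hiff : (((a : Int), ((c : Int), (b : Int))) = t)
        ↔ ((a : Int) = t.1 ∧ (b : Int) = t.2.2 ∧ (c : Int) = t.2.1) := by
      obtain ⟨tz, tx, ty⟩ := t
      simp only [Prod.mk.injEq]
      constructor
      · rintro ⟨h1, h2, h3⟩; exact ⟨h1, h3, h2⟩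
      · rintro ⟨h1, h2, h3⟩; exact ⟨h1, h3, h2⟩
    by_cases h2 : ((a : Int), ((c : Int), (b : Int))) ∈ ts
    · rw [if_pos h2, if_pos (List.mem_cons_of_mem _ h2)]
    · rw [if_neg h2, hstep, hset]
      by_cases h1 : ((a : Int), ((c : Int), (b : Int))) = t
      · obtain ⟨e1, e2, e3⟩ := hiff.mp h1
        rw [if_pos (hiff.mp h1), if_pos (List.mem_cons.mpr (Or.inl h1)), ← e1, ← e2, ← e3]
      · rw [if_neg (fun hcond => h1 (hiff.mpr hcond)),
          if_neg (by rw [List.mem_cons]; rintro (h | h); exact h1 h; exact h2 h)]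

-- membership in the flattened loop-index list
theorem pvMemT (size zm za xa ya : Int) :
    ((za, (xa, ya)) ∈ (PySem.List.pyRange 0 zm 1).flatMap (fun z =>
        (pvProd2 (PySem.List.pyRange 0 size 1)).map (fun xy => (z, xy))))
      ↔ (0 ≤ za ∧ za < zm ∧ 0 ≤ xa ∧ xa < size ∧ 0 ≤ ya ∧ ya < size) := by
  simp only [pvProd2]
  constructor
  · intro h
    rcases List.mem_flatMap.mp h with ⟨z, hz, hmem⟩
    rcases List.mem_map.mp hmem with ⟨xy, hxy, he⟩
    rcases List.mem_flatMap.mp hxy with ⟨x, hx, hmem2⟩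
    rcases List.mem_map.mp hmem2 with ⟨y, hy, rfl⟩
    rw [Prod.mk.injEq, Prod.mk.injEq] at he
    obtain ⟨he1, he2, he3⟩ := he
    subst he1; subst he2; subst he3
    have h1 := PySem.List.mem_pyRange_one.mp hz
    have h2 := PySem.List.mem_pyRange_one.mp hx
    have h3 := PySem.List.mem_pyRange_one.mp hy
    exact ⟨h1.1, h1.2, h2.1, h2.2, h3.1, h3.2⟩
  · rintro ⟨h1, h2, h3, h4, h5, h6⟩
    exact List.mem_flatMap.mpr ⟨za, PySem.List.mem_pyRange_one.mpr ⟨h1, h2⟩,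
      List.mem_map.mpr ⟨(xa, ya),
        List.mem_flatMap.mpr ⟨xa, PySem.List.mem_pyRange_one.mpr ⟨h3, h4⟩,
          List.mem_map.mpr ⟨ya, PySem.List.mem_pyRange_one.mpr ⟨h5, h6⟩, rfl⟩⟩, rfl⟩⟩

-- grids with equal shape and equal cells are equal
theorem pvExt (g1 g2 : List (List (List Int))) (zn sn : Nat)
    (h1 : pvShape g1 zn sn) (h2 : pvShape g2 zn sn)
    (h : ∀ (a b c : Nat), a < zn → b < sn → c < sn → pvCell g1 a b c = pvCell g2 a b c) :
    g1 = g2 := by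
  obtain ⟨hl1, hc1⟩ := h1
  obtain ⟨hl2, hc2⟩ := h2
  apply List.ext_getElem?
  intro a
  by_cases ha : a < zn
  · have ha1 : a < g1.length := by omega
    have ha2 : a < g2.length := by omega
    rw [List.getElem?_eq_getElem ha1, List.getElem?_eq_getElem ha2]
    obtain ⟨hL1len, hL1rows⟩ := hc1 a g1[a] (List.getElem?_eq_getElem ha1)
    obtain ⟨hL2len, hL2rows⟩ := hc2 a g2[a] (List.getElem?_eq_getElem ha2)
    congr 1
    apply List.ext_getElem?
    intro b
    by_cases hb : b < sn
    · have hb1 : b < g1[a].length := by omega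
      have hb2 : b < g2[a].length := by omega
      rw [List.getElem?_eq_getElem hb1, List.getElem?_eq_getElem hb2]
      have hr1len := hL1rows b g1[a][b] (List.getElem?_eq_getElem hb1)
      have hr2len := hL2rows b g2[a][b] (List.getElem?_eq_getElem hb2)
      congr 1
      apply List.ext_getElem?
      intro c
      by_cases hc : c < sn
      · have hcc := h a b c ha hb hc
        simp only [pvCell, List.getElem?_eq_getElem ha1, List.getElem?_eq_getElem ha2,
          List.getElem?_eq_getElem hb1, List.getElem?_eq_getElem hb2,
          Option.bind_some] at hcc
        exact hcc
      · rw [List.getElem?_eq_none (by omega), List.getElem?_eq_none (by omega)]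
    · rw [List.getElem?_eq_none (by omega), List.getElem?_eq_none (by omega)]
  · rw [List.getElem?_eq_none (by omega), List.getElem?_eq_none (by omega)]

-- the main equality (unconditional: both ports are total functions)
theorem pvMain (cubes : List (List (List Int))) (size : Int) (cycs : Int) :
    cycle3 cubes size cycs = cycle3_alt cubes size cycs := by
  have hA : cycle3 cubes size cycs
      = (PySem.List.pyRange 0 (1 + cycs * 2) 1).foldl (fun cpy z =>
          (pvProd2 (PySem.List.pyRange 0 size 1)).foldl
            (fun cpy xy => pvAStep cubes size (1 + cycs * 2) cpy z xy) cpy)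
          (pvMk (1 + cycs * 2) size (fun _ _ _ => 0)) := rfl
  have hB : cycle3_alt cubes size cycs
      = pvMk (1 + cycs * 2) size (fun z y x =>
          pvRule (pvGet3 cubes z y x)
            (pvGet3 (pvPassX (pvPassY (pvPassZ cubes size (1 + cycs * 2)) size (1 + cycs * 2)) size (1 + cycs * 2)) z y x
              - pvGet3 cubes z y x)) := rfl
  rw [hA, hB, foldl_foldl_flatMap]
  set zm := 1 + cycs * 2 with hzm
  have hts : ∀ t ∈ (PySem.List.pyRange 0 zm 1).flatMap (fun z =>
      (pvProd2 (PySem.List.pyRange 0 size 1)).map (fun xy => (z, xy))),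
      0 ≤ t.1 ∧ t.1 < zm ∧ 0 ≤ t.2.1 ∧ t.2.1 < size ∧ 0 ≤ t.2.2 ∧ t.2.2 < size := by
    intro t ht
    exact (pvMemT size zm t.1 t.2.1 t.2.2).mp (by simpa using ht)
  obtain ⟨hShape, hCellA⟩ := pvFoldA cubes size zm _ _ (pvMk_shape zm size _) hts
  apply pvExt _ _ zm.toNat size.toNat hShape (pvMk_shape zm size _)
  intro a b c ha hb hc
  rw [hCellA a b c ha hb hc]
  rw [if_pos ((pvMemT size zm (a : Int) (c : Int) (b : Int)).mpr
    ⟨by omega, by omega, by omega, by omega, by omega, by omega⟩)]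
  rw [pvMk_cellN zm size _ a b c ha hb hc]
  congr 1
  exact pvCellEq cubes size zm (a : Int) (b : Int) (c : Int)
    ⟨by omega, by omega⟩ ⟨by omega, by omega⟩ ⟨by omega, by omega⟩

-- ===== VERDICT (by name: the statement is the Claim_ definition above) =====
theorem cycle3_spec : Claim_equal_cycle3 := by
  intro cubes size cycs _ _
  unfold Spec_cycle3
  exact pvMain cubes size cycs
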